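-- pv_equiv track=rewrite | github.com/promto-c/blackboard | blackboard/utils/database/sql_query_builder.py | propagate_hierarchies
-- ===== SOURCE A (Python) =====
-- from typing import Dict, Any, List, Tuple, Optional, Union, Generator, Iterable, Set
--
-- def propagate_hierarchies(fields: List[str], separator: str = '.', prune_leaves: int = 0) -> List[str]:
--     """Propagate and ensure all levels of hierarchy are referenced, with an option to prune levels from the leaves.
--
--     Args:
--         fields (list of str): List of hierarchical strings.
--         separator (str): Separator used to split the hierarchy strings. Default is '.'.
--         prune_leaves (int): Number of levels to prune from the end of each hierarchy. Default is 0.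
--
--     Returns:
--         List[str]: Unique propagated hierarchy references (sorted lexicographically).
--
--     Examples:
--         >>> SQLQueryBuilder.propagate_hierarchies([
--         ...     "shot.sequence.project.name",
--         ...     "shot.name",
--         ...     "name",
--         ...     "status",
--         ...     "user.name"
--         ... ], prune_leaves=1)
--         ['shot', 'shot.sequence', 'shot.sequence.project', 'user']
--
--         >>> SQLQueryBuilder.propagate_hierarchies([
--         ...     "department.team.lead.name",
--         ...     "department.team.project.status",
--         ...     "company.department.team.lead",
--         ...     "company.department",
--         ...     "team.member.task"
--         ... ], prune_leaves=1)
--         ['company', 'company.department', 'company.department.team', 'department', 'department.team', 'department.team.lead', 'department.team.project', 'team', 'team.member']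
--
--         >>> SQLQueryBuilder.propagate_hierarchies(["a.b.c.d", "a.b.c", "x.y.z"], prune_leaves=2)
--         ['a', 'a.b', 'x']
--
--         >>> SQLQueryBuilder.propagate_hierarchies(["level1/level2", "level1/level2/level3"], separator='/')
--         ['level1', 'level1/level2', 'level1/level2/level3']
--
--         >>> SQLQueryBuilder.propagate_hierarchies(["root.branch.leaf"], prune_leaves=3)
--         []
--     """
--     # Preprocess fields to flatten into a list of strings
--     expanded_fields = []
--     for field in fields:
--         if isinstance(field, str):
--             # If the field is a string, add it directly
--             expanded_fields.append(field)
--         elif isinstance(field, dict):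
--             # If the field is a dictionarie, extract keys and add them
--             expanded_fields.extend(field.keys())
--         else:
--             # Skip invalid field types
--             continue
--     fields = expanded_fields
--
--     unique_hierarchies = set()
--
--     for field in fields:
--         tokens = field.split(separator)
--
--         # Generate all prefix levels
--         for i in range(len(tokens) - prune_leaves):
--             prefix = separator.join(tokens[:i+1])
--             unique_hierarchies.add(prefix)
--
--     # Return a lexicographically sorted list
--     return sorted(unique_hierarchies)
-- ===== SOURCE B (Python) =====
-- def propagate_hierarchies(fields, separator='.', prune_leaves=0):
--     # Build a trie of token paths, then walk it with an explicit stack,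
--     # emitting the joined path of every trie node; one sorted(set(...)) at the end.
--     root = {}
--     for field in fields:
--         tokens = field.split(separator)
--         keep = len(tokens) - prune_leaves
--         node = root
--         for token in tokens[:max(keep, 0)]:
--             node = node.setdefault(token, {})
--     result = []
--     stack = [(root, None)]
--     while stack:
--         node, path = stack.pop()
--         for token, child in node.items():
--             sub = token if path is None else path + separator + token
--             result.append(sub)
--             stack.append((child, sub))
--     return sorted(set(result))
-- ===== Notes on version B (the rewrite author's own statement) =====
-- stated objective: alternative
-- what changed: B builds a trie (nested dict) from the kept tokens of each field and then walks it with an explicit stack, emitting each trie node's joined path once per node, instead of A's per-field enumeration of every sliced-and-joined prefix into a set.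
-- outside the precondition, e.g. on propagate_hierarchies(['a.b'], '', 0): A raises ValueError, B raises ValueError
import Mathlib
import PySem

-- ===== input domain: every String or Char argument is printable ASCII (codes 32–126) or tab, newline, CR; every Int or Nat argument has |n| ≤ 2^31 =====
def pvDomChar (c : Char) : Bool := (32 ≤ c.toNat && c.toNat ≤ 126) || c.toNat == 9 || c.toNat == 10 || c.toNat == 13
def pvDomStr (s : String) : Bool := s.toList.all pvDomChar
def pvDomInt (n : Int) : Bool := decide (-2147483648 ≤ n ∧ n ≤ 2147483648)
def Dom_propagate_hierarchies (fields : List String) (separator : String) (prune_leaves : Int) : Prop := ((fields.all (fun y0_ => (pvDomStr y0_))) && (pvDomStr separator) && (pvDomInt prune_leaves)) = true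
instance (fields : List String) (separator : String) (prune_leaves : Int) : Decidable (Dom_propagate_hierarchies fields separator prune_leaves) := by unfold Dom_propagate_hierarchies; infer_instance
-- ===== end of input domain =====

-- B builds a trie of token paths (a nested dict in Python) and then walks it with an
-- explicit stack, emitting each trie node's joined path once per node, instead of A's
-- per-field enumeration of every prefix join into a set (objective: alternative data structure).

-- ===== PORT A =====
def propagate_hierarchies (fields : List String) (separator : String) (prune_leaves : Int) : List String :=
  -- flatten phase: every element of `fields : List String` is a str, so each is appended as-is
  let expanded_fields := fields.foldl (fun acc field => acc ++ [field]) []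
  let unique_hierarchies : PySem.Set String :=
    expanded_fields.foldl (fun (s : PySem.Set String) field =>
      let tokens := (PySem.Str.split? field separator).getD []   -- sep = "" raises ValueError: excluded by Pre_
      (PySem.List.pyRange 0 (PySem.List.len tokens - prune_leaves)).foldl
        (fun s i =>
          PySem.Set.add s
            (PySem.Str.join separator (PySem.List.slice tokens none (some (i + 1))))) s)
      PySem.Set.empty
  PySem.List.sorted unique_hierarchies (fun x => x)

-- ===== PORT B =====
-- a trie over tokens (the Python nested dict {token: child_dict}) in first-child/next-sibling
-- form: `cons k child sib` is one dict entry (key k, child dict, remaining entries), `nil` is {}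
inductive PTrie : Type
  | nil : PTrie
  | cons : String → PTrie → PTrie → PTrie
deriving DecidableEq, Repr

def pvTSize : PTrie → Nat
  | .nil => 1
  | .cons _ c s => 1 + pvTSize c + pvTSize s

-- `token if path is None else path + separator + token`
def pvSub (sep : String) (path : Option String) (tok : String) : String :=
  match path with
  | none => tok
  | some a => a ++ sep ++ tok

-- the descent loop `node = node.setdefault(token, {})` over the kept tokens, as a persistent insert
def trieInsert : PTrie → List String → PTrie
  | d, [] => d
  | .nil, tok :: rest => .cons tok (trieInsert .nil rest) .nil
  | .cons k c s, tok :: rest =>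
      if k = tok then .cons k (trieInsert c rest) s
      else .cons k c (trieInsert s (tok :: rest))
termination_by d ts => (ts.length, pvTSize d)
decreasing_by all_goals (simp_wf; simp [pvTSize]; omega)

def stackWeight (stack : List (PTrie × Option String)) : Nat :=
  (stack.map (fun tp => pvTSize tp.1)).sum

lemma pv_stackWeight_cons (d : PTrie) (p : Option String) (stack : List (PTrie × Option String)) :
    stackWeight ((d, p) :: stack) = pvTSize d + stackWeight stack := by
  simp [stackWeight]

-- the inner `for token, child in node.items(): result.append(sub); stack.append((child, sub))`
-- (stack modelled with its top at the head)
def visit (sep : String) (path : Option String) :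
    PTrie → List String × List (PTrie × Option String) → List String × List (PTrie × Option String)
  | .nil, st => st
  | .cons k c s, (res, stack) =>
      visit sep path s (res ++ [pvSub sep path k], (c, some (pvSub sep path k)) :: stack)

lemma pv_visit_weight (sep : String) (path : Option String) :
    ∀ (d : PTrie) (res : List String) (stack : List (PTrie × Option String)),
      stackWeight (visit sep path d (res, stack)).2 < pvTSize d + stackWeight stack := by
  intro d
  induction d with
  | nil => intro res stack; simp [visit, pvTSize]
  | cons k c s ihc ihs =>
    intro res stack
    calc stackWeight (visit sep path s
            (res ++ [pvSub sep path k], (c, some (pvSub sep path k)) :: stack)).2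
        < pvTSize s + stackWeight ((c, some (pvSub sep path k)) :: stack) := ihs _ _
      _ ≤ pvTSize (PTrie.cons k c s) + stackWeight stack := by
          rw [pv_stackWeight_cons]
          simp [pvTSize]
          omega

-- the `while stack:` loop
def dfsLoop (sep : String) : List String → List (PTrie × Option String) → List String
  | res, [] => res
  | res, (d, path) :: stack =>
      dfsLoop sep (visit sep path d (res, stack)).1 (visit sep path d (res, stack)).2
termination_by res stack => stackWeight stack
decreasing_by
  rw [pv_stackWeight_cons]
  exact pv_visit_weight sep path d res stack

def propagate_hierarchies_alt (fields : List String) (separator : String) (prune_leaves : Int) : List String :=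
  let root := fields.foldl (fun (root : PTrie) field =>
      let tokens := (PySem.Str.split? field separator).getD []   -- sep = "" raises ValueError: excluded by Pre_
      let keep := PySem.List.len tokens - prune_leaves
      trieInsert root (PySem.List.slice tokens none (some (max keep 0)))) .nil
  let result := dfsLoop separator [] [(root, none)]
  PySem.List.sorted (PySem.Set.ofList result) (fun x => x)

-- ===== PRECONDITION & SPEC =====
-- Pre_ excludes only the inputs where Python A (and B alike) raises ValueError:
-- a non-empty fields list with an empty separator ('' is not a valid str.split separator).
def Pre_propagate_hierarchies (fields : List String) (separator : String) (prune_leaves : Int) : Prop :=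
  separator ≠ "" ∨ fields = []
instance (fields : List String) (separator : String) (prune_leaves : Int) : Decidable (Pre_propagate_hierarchies fields separator prune_leaves) := by unfold Pre_propagate_hierarchies; infer_instance

def pvWitness_propagate_hierarchies : List String × String × Int :=
  (["shot.sequence.name", "shot.name", "user"], ".", 1)

def Spec_propagate_hierarchies (fields : List String) (separator : String) (prune_leaves : Int) (out : List String) : Prop := out = propagate_hierarchies_alt fields separator prune_leaves
instance (fields : List String) (separator : String) (prune_leaves : Int) (out : List String) : Decidable (Spec_propagate_hierarchies fields separator prune_leaves out) := by unfold Spec_propagate_hierarchies; infer_instance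

-- ===== CLAIM (what is proved, stated in full; the proofs are below) =====
def Claim_equal_propagate_hierarchies : Prop := ∀ (fields : List String) (separator : String) (prune_leaves : Int), Dom_propagate_hierarchies fields separator prune_leaves → Pre_propagate_hierarchies fields separator prune_leaves → Spec_propagate_hierarchies fields separator prune_leaves (propagate_hierarchies fields separator prune_leaves)

-- ===== LEMMAS AND PROOFS =====

-- The per-field prefix strings accumulated along a descent from `path`.
def pvEmit (sep : String) : Option String → List String → List String
  | _, [] => []
  | a?, t :: ts => pvSub sep a? t :: pvEmit sep (some (pvSub sep a? t)) ts

-- proof-side abbreviations for the per-field data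
def pvToks (sep f : String) : List String := (PySem.Str.split? f sep).getD []
def pvN (sep f : String) (prune : Int) : Nat := (PySem.List.len (pvToks sep f) - prune).toNat
def pvAf (sep : String) (prune : Int) (f : String) : List String :=
  (List.range (pvN sep f prune)).map (fun k => PySem.Str.join sep ((pvToks sep f).take (k + 1)))
def pvBf (sep : String) (prune : Int) (f : String) : List String :=
  pvEmit sep none ((pvToks sep f).take (pvN sep f prune))

lemma pv_go_ne_nil (sep : List Char) :
    ∀ (fuel : Nat) (s cur : List Char) (acc : List (List Char)),
      PySem.Chars.splitOn.go sep fuel s cur acc ≠ [] := by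
  intro fuel
  induction fuel with
  | zero => intro s cur acc; rw [PySem.Chars.splitOn.go]; simp
  | succ n ih =>
    intro s cur acc
    cases s with
    | nil => rw [PySem.Chars.splitOn.go]; simp; omega
    | cons c rest =>
      rw [PySem.Chars.splitOn.go]
      split
      · exact ih _ _ _
      · exact ih _ _ _

-- str.split on a non-empty separator always returns a non-empty list of pieces
lemma pv_tokens_ne_nil (f sep : String) (h : sep ≠ "") :
    (PySem.Str.split? f sep).getD [] ≠ [] := by
  have hsep : sep.toList ≠ [] := by
    intro hc; apply h; exact String.toList_inj.mp (by simp [hc])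
  have hsome : PySem.Chars.split? f.toList sep.toList
      = some (PySem.Chars.splitOn f.toList sep.toList) := by
    unfold PySem.Chars.split?; simp [hsep]
  simp [PySem.Str.split?, hsome]
  unfold PySem.Chars.splitOn
  exact pv_go_ne_nil _ _ _ _ _

lemma pv_join_singleton (sep x : String) : PySem.Str.join sep [x] = x := by
  apply String.toList_inj.mp
  simp [PySem.Str.toList_join, PySem.Chars.join, List.intercalate]

lemma pv_join_cons (sep x : String) (l : List String) (h : l ≠ []) :
    PySem.Str.join sep (x :: l) = x ++ sep ++ PySem.Str.join sep l := by
  apply String.toList_inj.mp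
  cases l with
  | nil => exact absurd rfl h
  | cons y ys => simp [PySem.Str.toList_join, PySem.Chars.join_cons_cons]

lemma pvEmit_some (sep : String) (ts : List String) :
    ∀ (a : String), pvEmit sep (some a) ts
      = (List.range ts.length).map
          (fun k => a ++ sep ++ PySem.Str.join sep (ts.take (k + 1))) := by
  induction ts with
  | nil => intro a; simp [pvEmit]
  | cons t ts ih =>
    intro a
    simp only [pvEmit, pvSub, ih, List.length_cons, List.range_succ_eq_map, List.map_cons, List.map_map]
    congr 1
    · simp [pv_join_singleton]
    · apply List.map_congr_left
      intro k hk
      have hne : (ts.take (k + 1)) ≠ [] := by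
        simp [List.mem_range] at hk
        intro hc
        rcases List.take_eq_nil_iff.mp hc with h1 | h1
        · omega
        · subst h1; simp at hk
      simp only [Function.comp, List.take_succ_cons, pv_join_cons sep t (ts.take (k+1)) hne]
      simp [String.append_assoc]

lemma pvEmit_none (sep : String) (ts : List String) :
    pvEmit sep none ts
      = (List.range ts.length).map (fun k => PySem.Str.join sep (ts.take (k + 1))) := by
  cases ts with
  | nil => simp [pvEmit]
  | cons t ts =>
    simp only [pvEmit, pvSub, pvEmit_some, List.length_cons, List.range_succ_eq_map, List.map_cons,
      List.map_map]
    congr 1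
    · simp [pv_join_singleton]
    · apply List.map_congr_left
      intro k hk
      have hne : (ts.take (k + 1)) ≠ [] := by
        simp [List.mem_range] at hk
        intro hc
        rcases List.take_eq_nil_iff.mp hc with h1 | h1
        · omega
        · subst h1; simp at hk
      simp [Function.comp, List.take_succ_cons, pv_join_cons sep t (ts.take (k+1)) hne]

lemma pyRange_zero_toNat (b : Int) :
    PySem.List.pyRange 0 b = (List.range b.toNat).map (fun k : Nat => (k : Int)) := by
  rcases b with n | n
  · simpa using PySem.List.pyRange_zero_natCast n
  · have hnil : PySem.List.pyRange 0 (Int.negSucc n) = [] := by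
      apply List.eq_nil_iff_forall_not_mem.mpr
      intro x hx
      have := PySem.List.mem_pyRange_one.mp hx
      omega
    simp [hnil]

-- membership equivalence of the per-field emitted lists (A may emit duplicate entries
-- when prune_leaves < 0; the sets of emitted strings agree)
lemma pv_mem_emit (sep : String) (ts : List String) (hts : ts ≠ []) (n : Nat) (x : String) :
    (x ∈ (List.range n).map (fun k => PySem.Str.join sep (ts.take (k + 1))) ↔
      x ∈ pvEmit sep none (ts.take n)) := by
  rw [pvEmit_none]
  simp only [List.mem_map, List.mem_range, List.length_take, List.take_take]
  constructor
  · rintro ⟨k, hk, he⟩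
    by_cases hkL : k < min n ts.length
    · refine ⟨k, hkL, ?_⟩
      have h1 : min (k + 1) n = k + 1 := by omega
      rw [h1]; exact he
    · have hlen : 0 < ts.length := List.length_pos_of_ne_nil hts
      refine ⟨ts.length - 1, by omega, ?_⟩
      have h1 : min (ts.length - 1 + 1) n = ts.length := by omega
      rw [h1, List.take_length]
      rw [List.take_of_length_le (by omega)] at he
      exact he
  · rintro ⟨k, hk, he⟩
    refine ⟨k, by omega, ?_⟩
    have h1 : min (k + 1) n = k + 1 := by omega
    rw [h1] at he
    exact he

-- A's result is sorted(set(all A-emitted prefixes))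
lemma pv_A_eq (fields : List String) (sep : String) (prune : Int) :
    propagate_hierarchies fields sep prune
      = PySem.List.sorted (PySem.Set.ofList (fields.flatMap (pvAf sep prune))) (fun x => x) := by
  simp only [propagate_hierarchies]
  have hexp : fields.foldl (fun acc field => acc ++ [field]) [] = fields := by
    simpa using PySem.List.foldl_append_eq_flatMap (fun f => [f]) fields []
  rw [hexp]
  congr 1
  rw [PySem.Set.ofList_eq_foldl, List.foldl_flatMap]
  show List.foldl _ ([] : PySem.Set String) fields = _
  apply PySem.List.foldl_congr_mem
  intro s field _
  show (PySem.List.pyRange 0 (PySem.List.len (pvToks sep field) - prune)).foldl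
        (fun s i =>
          PySem.Set.add s
            (PySem.Str.join sep (PySem.List.slice (pvToks sep field) none (some (i + 1))))) s
      = (pvAf sep prune field).foldl PySem.Set.add s
  rw [pyRange_zero_toNat, List.foldl_map]
  unfold pvAf
  rw [List.foldl_map]
  apply PySem.List.foldl_congr_mem
  intro acc a _
  rw [PySem.List.slice_to _ (by omega)]
  have h2 : ((a : Int) + 1).toNat = a + 1 := by omega
  rw [h2]

-- ===== trie lemmas =====

-- the joined path of every node of the trie (specification of the DFS)
def triePaths (sep : String) (path : Option String) : PTrie → List String
  | .nil => []
  | .cons k c s =>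
      pvSub sep path k :: (triePaths sep (some (pvSub sep path k)) c ++ triePaths sep path s)

def kidLabels (sep : String) (path : Option String) : PTrie → List String
  | .nil => []
  | .cons k _ s => pvSub sep path k :: kidLabels sep path s

def kidPairs (sep : String) (path : Option String) : PTrie → List (PTrie × Option String)
  | .nil => []
  | .cons k c s => (c, some (pvSub sep path k)) :: kidPairs sep path s

lemma pv_visit_fst (sep : String) (path : Option String) :
    ∀ (d : PTrie) (res : List String) (stack : List (PTrie × Option String)),
      (visit sep path d (res, stack)).1 = res ++ kidLabels sep path d := by
  intro d
  induction d with
  | nil => intro res stack; simp [visit, kidLabels]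
  | cons k c s ihc ihs => intro res stack; simp [visit, kidLabels, ihs]

lemma pv_visit_snd (sep : String) (path : Option String) :
    ∀ (d : PTrie) (res : List String) (stack : List (PTrie × Option String)),
      (visit sep path d (res, stack)).2 = (kidPairs sep path d).reverse ++ stack := by
  intro d
  induction d with
  | nil => intro res stack; simp [visit, kidPairs]
  | cons k c s ihc ihs => intro res stack; simp [visit, kidPairs, ihs]

def stackPaths (sep : String) (stack : List (PTrie × Option String)) : List String :=
  stack.flatMap (fun tp => triePaths sep tp.2 tp.1)

lemma pv_triePaths_mem (sep : String) (path : Option String) (d : PTrie) (x : String) :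
    x ∈ triePaths sep path d ↔
      x ∈ kidLabels sep path d ∨ x ∈ stackPaths sep (kidPairs sep path d) := by
  induction d generalizing path with
  | nil => simp [triePaths, kidLabels, kidPairs, stackPaths]
  | cons k c s ihc ihs =>
    simp only [triePaths, kidLabels, kidPairs, stackPaths, List.flatMap_cons, List.mem_cons,
      List.mem_append]
    rw [ihc, ihs]
    simp only [stackPaths]
    tauto

lemma pv_dfs_mem (sep : String) :
    ∀ (res : List String) (stack : List (PTrie × Option String)) (x : String),
      x ∈ dfsLoop sep res stack ↔ x ∈ res ∨ x ∈ stackPaths sep stack := by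
  intro res stack
  induction res, stack using dfsLoop.induct sep with
  | case1 res => intro x; simp [dfsLoop, stackPaths]
  | case2 res d path stack ih =>
    intro x
    rw [dfsLoop]
    rw [ih x]
    rw [pv_visit_fst, pv_visit_snd]
    have hc := pv_triePaths_mem sep path d x
    simp only [stackPaths, List.mem_append, List.mem_flatMap, List.mem_reverse,
      List.flatMap_cons] at *
    rw [hc]
    constructor
    · rintro ((h | h) | ⟨a, (ha | ha), hq⟩)
      · exact Or.inl h
      · exact Or.inr (Or.inl (Or.inl h))
      · exact Or.inr (Or.inl (Or.inr ⟨a, ha, hq⟩))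
      · exact Or.inr (Or.inr ⟨a, ha, hq⟩)
    · rintro (h | ((h | ⟨a, ha, hq⟩) | ⟨a, ha, hq⟩))
      · exact Or.inl (Or.inl h)
      · exact Or.inl (Or.inr h)
      · exact Or.inr ⟨a, Or.inl ha, hq⟩
      · exact Or.inr ⟨a, Or.inr ha, hq⟩

lemma pv_insert_mem (sep : String) :
    ∀ (ts : List String) (d : PTrie) (path : Option String) (x : String),
      x ∈ triePaths sep path (trieInsert d ts) ↔
        x ∈ triePaths sep path d ∨ x ∈ pvEmit sep path ts := by
  intro ts
  induction ts with
  | nil =>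
    intro d path x
    rw [show trieInsert d [] = d from by rw [trieInsert]]
    simp [pvEmit]
  | cons tok rest ih =>
    intro d path x
    induction d generalizing path with
    | nil =>
      rw [show trieInsert .nil (tok :: rest)
            = .cons tok (trieInsert .nil rest) .nil from by rw [trieInsert]]
      simp only [triePaths, pvEmit, List.mem_cons, List.mem_append, List.not_mem_nil]
      rw [ih]
      simp only [triePaths, List.not_mem_nil]
      tauto
    | cons k c s ihc ihs =>
      rw [show trieInsert (.cons k c s) (tok :: rest)
            = if k = tok then .cons k (trieInsert c rest) s
              else .cons k c (trieInsert s (tok :: rest)) from by rw [trieInsert]]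
      by_cases hk : k = tok
      · rw [if_pos hk]
        subst hk
        simp only [triePaths, pvEmit, List.mem_cons, List.mem_append]
        rw [ih]
        tauto
      · rw [if_neg hk]
        simp only [triePaths, pvEmit, List.mem_cons, List.mem_append]
        rw [ihs]
        simp only [pvEmit, List.mem_cons]
        tauto

lemma pv_fold_insert_mem (sep : String) (prune : Int) :
    ∀ (fields : List String) (t : PTrie) (x : String),
      (x ∈ triePaths sep none
          (fields.foldl (fun r f => trieInsert r ((pvToks sep f).take (pvN sep f prune))) t) ↔
        x ∈ triePaths sep none t ∨ x ∈ fields.flatMap (pvBf sep prune)) := by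
  intro fields
  induction fields with
  | nil => intro t x; simp
  | cons f fs ih =>
    intro t x
    simp only [List.foldl_cons, List.flatMap_cons, List.mem_append]
    rw [ih, pv_insert_mem]
    unfold pvBf
    tauto

-- B's result is sorted(set(all node paths)), with the same members as flatMap pvBf
lemma pv_B_eq (fields : List String) (sep : String) (prune : Int) :
    ∃ l : List String, propagate_hierarchies_alt fields sep prune
        = PySem.List.sorted (PySem.Set.ofList l) (fun x => x)
      ∧ ∀ x, x ∈ l ↔ x ∈ fields.flatMap (pvBf sep prune) := by
  simp only [propagate_hierarchies_alt]
  refine ⟨_, rfl, ?_⟩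
  intro x
  rw [pv_dfs_mem]
  simp only [List.not_mem_nil, false_or]
  have hfold : fields.foldl (fun (root : PTrie) field =>
        trieInsert root (PySem.List.slice ((PySem.Str.split? field sep).getD []) none
          (some (max (PySem.List.len ((PySem.Str.split? field sep).getD []) - prune) 0)))) .nil
      = fields.foldl (fun r f => trieInsert r ((pvToks sep f).take (pvN sep f prune))) .nil := by
    apply PySem.List.foldl_congr_mem
    intro r f _
    congr 1
    rw [PySem.List.slice_to _ (le_max_right _ _)]
    simp only [pvToks, pvN]
    congr 1
    omega
  simp only [stackPaths, List.flatMap_cons, List.flatMap_nil, List.append_nil]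
  rw [hfold, pv_fold_insert_mem]
  simp [triePaths]

-- two sorted(set(_)) lists with the same members are equal
lemma pv_sorted_ofList_congr (l1 l2 : List String) (h : ∀ x, x ∈ l1 ↔ x ∈ l2) :
    PySem.List.sorted (PySem.Set.ofList l1) (fun x => x)
      = PySem.List.sorted (PySem.Set.ofList l2) (fun x => x) := by
  have h1 := PySem.List.sorted_ofList_pairwise_lt l1
  have h2 := PySem.List.sorted_ofList_pairwise_lt l2
  apply List.Perm.eq_of_pairwise (le := (· < ·))
    (fun a b _ _ hlt hlt' => absurd hlt' (lt_asymm hlt)) h1 h2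
  apply (List.perm_ext_iff_of_nodup
    (List.Pairwise.imp (fun hlt => ne_of_lt hlt) h1)
    (List.Pairwise.imp (fun hlt => ne_of_lt hlt) h2)).mpr
  intro a
  rw [PySem.List.mem_sorted, PySem.List.mem_sorted, PySem.Set.mem_ofList, PySem.Set.mem_ofList]
  exact h a

-- ===== VERDICT (by name: the statement is the Claim_ definition above) =====
theorem propagate_hierarchies_spec : Claim_equal_propagate_hierarchies := by
  unfold Claim_equal_propagate_hierarchies
  intro fields sep prune _hdom hpre
  unfold Spec_propagate_hierarchies
  obtain ⟨l, hB, hl⟩ := pv_B_eq fields sep prune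
  rw [pv_A_eq, hB]
  apply pv_sorted_ofList_congr
  intro x
  rw [hl x]
  rcases hpre with hsep | hnil
  · simp only [List.mem_flatMap]
    constructor
    · rintro ⟨f, hf, hx⟩
      exact ⟨f, hf,
        (pv_mem_emit sep (pvToks sep f) (pv_tokens_ne_nil f sep hsep) (pvN sep f prune) x).mp hx⟩
    · rintro ⟨f, hf, hx⟩
      exact ⟨f, hf,
        (pv_mem_emit sep (pvToks sep f) (pv_tokens_ne_nil f sep hsep) (pvN sep f prune) x).mpr hx⟩
  · subst hnil
    simp
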